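-- pv_equiv track=rewrite | github.com/ivan-dives/python-itvdn | домашка/starter/lesson 4/Koshletskyi Taras/Task1.py | while_check
-- ===== SOURCE A (Python) =====
-- def while_check(a,b, step=-1):
--     sum = 0
--     while a <= b:
--         sum += a
--         a += 1
--     else:
--         for i in range(a, b-1, step):
--             sum += i
--     return sum
-- ===== SOURCE B (Python) =====
-- def while_check(a, b, step=-1):
--     # closed-form arithmetic-series sums; O(1) instead of O(b-a)
--     total = 0
--     if a <= b:
--         total = (a + b) * (b - a + 1) // 2
--         a = b + 1
--     stop = b - 1
--     if step > 0:
--         n = (stop - a + step - 1) // step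
--     else:
--         n = (stop - a + step + 1) // step
--     if n < 0:
--         n = 0
--     return total + n * a + step * (n * (n - 1) // 2)
-- ===== Notes on version B (the rewrite author's own statement) =====
-- stated objective: faster
-- what changed: Replaces A's two element-by-element summation loops (the while over a..b and the for over range(a, b-1, step)) with closed-form arithmetic-series formulas: Gauss sum for a..b and n*start + step*n*(n-1)//2 for the range, where n is the range length computed by one floor division; intended as faster (O(1) vs O(|b-a|)); the probe measured ~49x at the largest size on inputs that exercise the loops, parity where the loops are empty.
import Mathlib
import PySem

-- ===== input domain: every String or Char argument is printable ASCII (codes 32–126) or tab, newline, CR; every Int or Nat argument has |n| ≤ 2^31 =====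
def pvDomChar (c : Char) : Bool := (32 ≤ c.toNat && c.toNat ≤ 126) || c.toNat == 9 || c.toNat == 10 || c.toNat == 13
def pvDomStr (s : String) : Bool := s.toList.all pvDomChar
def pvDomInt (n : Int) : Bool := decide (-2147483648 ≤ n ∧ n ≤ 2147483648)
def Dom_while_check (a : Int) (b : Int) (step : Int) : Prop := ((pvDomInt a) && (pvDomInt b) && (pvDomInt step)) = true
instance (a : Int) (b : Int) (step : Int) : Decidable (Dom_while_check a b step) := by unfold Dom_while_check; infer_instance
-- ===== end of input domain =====

-- B replaces A's two element-by-element summation loops by closed-form arithmetic-series formulas;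
-- intended as faster (O(1) vs O(|b-a|)); a timing run measured ~49x at its largest size on inputs
-- that exercise the loops and parity on inputs where the loops are empty.

-- ===== PORT A =====
-- the 'while a <= b: sum += a; a += 1' loop; returns (final a, final sum)
def whileLoopA (a b sum : Int) : Int × Int :=
  if a ≤ b then whileLoopA (a + 1) b (sum + a) else (a, sum)
termination_by (b + 1 - a).toNat
decreasing_by omega

def while_check (a : Int) (b : Int) (step : Int) : Int :=
  let p := whileLoopA a b 0
  -- for i in range(a, b-1, step): sum += i
  (PySem.List.pyRange p.1 (b - 1) step).foldl (fun sum i => sum + i) p.2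

-- ===== PORT B =====
def while_check_alt (a : Int) (b : Int) (step : Int) : Int :=
  let total := if a ≤ b then PySem.Int.floordiv ((a + b) * (b - a + 1)) 2 else 0
  let a' := if a ≤ b then b + 1 else a
  let stop := b - 1
  let n0 := if step > 0 then PySem.Int.floordiv (stop - a' + step - 1) step
            else PySem.Int.floordiv (stop - a' + step + 1) step
  let n := if n0 < 0 then 0 else n0
  total + n * a' + step * PySem.Int.floordiv (n * (n - 1)) 2

-- ===== PRECONDITION & SPEC =====
-- Pre_ excludes exactly step = 0, on which Python's range(a, b-1, 0) raises ValueError in A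
-- (and B raises ZeroDivisionError).
def Pre_while_check (a : Int) (b : Int) (step : Int) : Prop := step ≠ 0
instance (a : Int) (b : Int) (step : Int) : Decidable (Pre_while_check a b step) := by
  unfold Pre_while_check; infer_instance

def pvWitness_while_check : Int × Int × Int := (0, 3, -1)

def Spec_while_check (a : Int) (b : Int) (step : Int) (out : Int) : Prop := out = while_check_alt a b step
instance (a : Int) (b : Int) (step : Int) (out : Int) : Decidable (Spec_while_check a b step out) := by
  unfold Spec_while_check; infer_instance

-- ===== CLAIM (what is proved, stated in full; the proofs are below) =====
def Claim_equal_while_check : Prop := ∀ (a : Int) (b : Int) (step : Int), Dom_while_check a b step → Pre_while_check a b step → Spec_while_check a b step (while_check a b step)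

-- ===== LEMMAS AND PROOFS =====

-- the while loop computed in closed form
theorem whileLoopA_eq (a b sum : Int) :
    whileLoopA a b sum =
      (if a ≤ b then b + 1 else a,
       sum + (if a ≤ b then ((a + b) * (b - a + 1)).fdiv 2 else 0)) := by
  fun_induction whileLoopA a b sum with
  | case1 a sum h ih =>
    rw [ih]
    by_cases h2 : a + 1 ≤ b
    · simp only [if_pos h, if_pos h2]
      have key : (a + b) * (b - a + 1) = (a + 1 + b) * (b - (a + 1) + 1) + a * 2 := by ring
      rw [key, Int.add_mul_fdiv_right _ _ (by norm_num : (2:Int) ≠ 0)]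
      simp only [Prod.mk.injEq]
      exact ⟨trivial, by ring⟩
    · have hab : a = b := by omega
      subst hab
      simp only [if_pos h, if_neg h2]
      have key : (a + a) * (a - a + 1) = 2 * a := by ring
      rw [key, Int.mul_fdiv_cancel_left _ (by norm_num : (2:Int) ≠ 0)]
      simp only [Prod.mk.injEq]
      exact ⟨trivial, by ring⟩
  | case2 a sum h => simp [h]

-- sum of an arithmetic progression, folded left
theorem foldl_range_map (a s : Int) :
    ∀ (n : Nat) (init : Int),
      List.foldl (fun acc i => acc + i) init (List.map (fun k : Nat => a + s * (k : Int)) (List.range n))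
        = init + n * a + s * ((n * (n - 1) / 2 : Nat) : Int) := by
  intro n
  induction n with
  | zero => intro init; simp
  | succ m ih =>
    intro init
    rw [List.range_succ, List.map_append, List.foldl_append, ih]
    have hNat : (m + 1) * ((m + 1) - 1) / 2 = m * (m - 1) / 2 + m := by
      rcases m with _ | k
      · simp
      · simp only [Nat.add_sub_cancel]
        have h1 : (k + 1 + 1) * (k + 1) = (k + 1) * k + 2 * (k + 1) := by ring
        omega
    rw [hNat]
    simp only [List.map_cons, List.map_nil, List.foldl_cons, List.foldl_nil]
    push_cast
    ring

-- triangular number: Nat division cast to Int fdiv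
theorem tri_cast (c : Nat) :
    ((c * (c - 1) / 2 : Nat) : Int) = Int.fdiv ((c : Int) * ((c : Int) - 1)) 2 := by
  rcases c with _ | k
  · norm_num [Int.zero_fdiv]
  · have h : ((k + 1 : Nat) : Int) * (((k + 1 : Nat) : Int) - 1) = (((k + 1) * k : Nat) : Int) := by
      push_cast; ring
    rw [h, Int.fdiv_eq_ediv_of_nonneg _ (by norm_num), Int.natCast_div]
    norm_cast

-- the count of a positive-step range matches B's clamped floor division
theorem count_cast (x s : Int) (hs : 0 < s) :
    (((if 0 < x then ((x + s - 1) / s).toNat else 0) : Nat) : Int)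
      = (if Int.fdiv (x + s - 1) s < 0 then 0 else Int.fdiv (x + s - 1) s) := by
  rw [Int.fdiv_eq_ediv_of_nonneg _ (le_of_lt hs)]
  by_cases hx : 0 < x
  · have hnum : 0 ≤ x + s - 1 := by omega
    have hq : 0 ≤ (x + s - 1) / s := Int.ediv_nonneg hnum (le_of_lt hs)
    rw [if_pos hx, if_neg (by omega), Int.toNat_of_nonneg hq]
  · have hlt : (x + s - 1) / s < 1 := by
      rw [Int.ediv_lt_iff_lt_mul hs]; omega
    rw [if_neg hx]
    split_ifs <;> omega

-- ===== VERDICT (by name: the statement is the Claim_ definition above) =====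
theorem while_check_spec : Claim_equal_while_check := by
  intro a b step _hDom hPre
  unfold Spec_while_check while_check while_check_alt
  rw [whileLoopA_eq]
  simp only [PySem.List.pyRange, PySem.Int.floordiv, if_neg (hPre : step ≠ 0)]
  set a' : Int := if a ≤ b then b + 1 else a with ha'
  set total : Int := if a ≤ b then ((a + b) * (b - a + 1)).fdiv 2 else 0 with htotal
  rcases lt_or_gt_of_ne (hPre : step ≠ 0) with hneg | hpos
  · -- step < 0
    rw [if_neg (by omega : ¬ 0 < step), if_neg (by omega : ¬ step > 0)]
    have hrw : Int.fdiv (a' - (b - 1) + -step - 1) (-step)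
        = Int.fdiv (b - 1 - a' + step + 1) step := by
      rw [show a' - (b - 1) + -step - 1 = -(b - 1 - a' + step + 1) by ring, Int.neg_fdiv_neg]
    have hcount := count_cast (a' - (b - 1)) (-step) (by omega)
    rw [foldl_range_map]
    have hcond : (b - 1 < a') ↔ (0 < a' - (b - 1)) := by omega
    simp only [hcond]
    rw [tri_cast, hcount, hrw]
    ring
  · -- step > 0
    rw [if_pos hpos, if_pos (by omega : step > 0)]
    have hcount := count_cast (b - 1 - a') step hpos
    rw [foldl_range_map]
    have hcond : (a' < b - 1) ↔ (0 < b - 1 - a') := by omega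
    simp only [hcond]
    rw [tri_cast, hcount]
    ring
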